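-- pv_equiv track=rewrite | github.com/polinenkosergey-dotcom/metrika-bot | metrika.py | _uni_slug_from_host
-- ===== SOURCE A (Python) =====
-- LAYERED_BASE_DOMAINS = [
--     "saas.sferaplatform.ru",
--     "sferaplatform.ru",
-- ]
--
-- def _uni_slug_from_host(host: str) -> str | None:
--     """
--     mai.saas.sferaplatform.ru → 'mai'
--     saas.sferaplatform.ru     → None (корневой домен)
--     """
--     for base in LAYERED_BASE_DOMAINS:
--         if host == base:
--             return None
--         if host.endswith("." + base):
--             subdomain = host[: -(len(base) + 1)]
--             return subdomain.split(".")[0]  # берём только первый сегмент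
--     # Неизвестный домен — первый сегмент субдомена
--     parts = host.split(".")
--     return parts[0] if len(parts) > 2 else None
-- ===== SOURCE B (Python) =====
-- LAYERED_BASE_DOMAINS = [
--     "saas.sferaplatform.ru",
--     "sferaplatform.ru",
-- ]
--
-- def _uni_slug_from_host(host: str) -> str | None:
--     # Known root domains map to None; any other host with more than two
--     # dot-separated parts yields its first part (for hosts ending in a known
--     # base this equals the first segment of the stripped subdomain).
--     if host in LAYERED_BASE_DOMAINS:
--         return None
--     parts = host.split(".")
--     return parts[0] if len(parts) > 2 else None
-- ===== Notes on version B (the rewrite author's own statement) =====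
-- stated objective: simpler
-- what changed: The per-base endswith/slice/split loop is replaced by a single membership guard against the base-domain list plus one split of the whole host with a part-count rule, which provably yields the same first segment.
import Mathlib
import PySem

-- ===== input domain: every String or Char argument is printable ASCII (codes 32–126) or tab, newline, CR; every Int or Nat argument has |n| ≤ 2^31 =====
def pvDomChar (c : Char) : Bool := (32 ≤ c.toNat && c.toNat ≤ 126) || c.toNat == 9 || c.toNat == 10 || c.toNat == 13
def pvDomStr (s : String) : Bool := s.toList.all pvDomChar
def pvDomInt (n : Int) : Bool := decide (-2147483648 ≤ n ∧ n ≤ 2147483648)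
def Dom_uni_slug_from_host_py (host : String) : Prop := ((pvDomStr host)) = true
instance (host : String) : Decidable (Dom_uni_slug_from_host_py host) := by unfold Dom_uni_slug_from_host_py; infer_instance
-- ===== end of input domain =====

-- B replaces A's per-base endswith/slice/split loop by one membership guard plus a
-- part-count rule on a single split of the host (objective: simpler).


-- ===== PORT A =====
def LAYERED_BASE_DOMAINS : List String := ["saas.sferaplatform.ru", "sferaplatform.ru"]

-- the for-loop over LAYERED_BASE_DOMAINS: `some r` = the loop returned r, `none` = fell through
-- (split with the nonempty separator "." never raises and never yields an empty list,
--  so `.getD []` / `.headD ""` are never actually the default)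
def uniLoopA (host : String) : List String → Option (Option String)
  | [] => none
  | base :: rest =>
    if host == base then some none
    else if PySem.Str.endswith host ("." ++ base) then
      -- subdomain = host[: -(len(base) + 1)]
      let subdomain := PySem.Str.slice host none (some (-(PySem.Str.len base + 1)))
      -- subdomain.split(".")[0]
      some (some (((PySem.Str.split? subdomain ".").getD []).headD ""))
    else uniLoopA host rest

def uni_slug_from_host_py (host : String) : Option String :=
  match uniLoopA host LAYERED_BASE_DOMAINS with
  | some r => r
  | none =>
    let parts := (PySem.Str.split? host ".").getD []
    if 2 < parts.length then some (parts.headD "") else none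

-- ===== PORT B =====
def uni_slug_from_host_py_alt (host : String) : Option String :=
  if LAYERED_BASE_DOMAINS.contains host then none
  else
    let parts := (PySem.Str.split? host ".").getD []
    if 2 < parts.length then some (parts.headD "") else none

-- ===== PRECONDITION & SPEC =====
def Spec_uni_slug_from_host_py (host : String) (out : Option String) : Prop := out = uni_slug_from_host_py_alt host
instance (host : String) (out : Option String) : Decidable (Spec_uni_slug_from_host_py host out) := by unfold Spec_uni_slug_from_host_py; infer_instance

-- ===== CLAIM (what is proved, stated in full; the proofs are below) =====
def Claim_equal_uni_slug_from_host_py : Prop := ∀ (host : String), Dom_uni_slug_from_host_py host → Spec_uni_slug_from_host_py host (uni_slug_from_host_py host)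

-- ===== LEMMAS AND PROOFS =====

/-- Specification version of Python's `split(".")` on char lists (structural recursion). -/
def sp : List Char → List (List Char)
  | [] => [[]]
  | c :: rest =>
    match sp rest with
    | [] => [[]]
    | h :: t => if c = '.' then [] :: h :: t else (c :: h) :: t

theorem sp_ne_nil (l : List Char) : sp l ≠ [] := by
  cases l with
  | nil => simp [sp]
  | cons c rest => simp only [sp]; cases sp rest <;> (simp; try (split <;> simp))

def consHead (x : List Char) : List (List Char) → List (List Char)
  | [] => [x]
  | h :: t => (x ++ h) :: t

theorem go_spec (fuel : Nat) (l cur : List Char) (acc : List (List Char))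
    (h : l.length < fuel) :
    PySem.Chars.splitOn.go ['.'] fuel l cur acc = acc.reverse ++ consHead cur.reverse (sp l) := by
  induction fuel generalizing l cur acc with
  | zero => omega
  | succ f ih =>
    cases l with
    | nil =>
      simp [PySem.Chars.splitOn.go, sp, consHead]
    | cons c rest =>
      rw [PySem.Chars.splitOn.go]
      by_cases hc : c = '.'
      · subst hc
        simp only [List.isPrefixOf, beq_self_eq_true, Bool.true_and, if_pos]
        rw [ih _ _ _ (by simpa using Nat.lt_of_succ_lt_succ h)]
        simp [sp, consHead]
        cases hsp : sp rest with
        | nil => exact absurd hsp (sp_ne_nil rest)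
        | cons h t => simp
      · have : (['.'].isPrefixOf (c :: rest)) = false := by
          simp [List.isPrefixOf]; exact fun hh => hc hh.symm
        rw [if_neg (by simp [this])]
        rw [ih _ _ _ (by simpa using Nat.lt_of_succ_lt_succ h)]
        simp only [sp]
        cases hsp : sp rest with
        | nil => exact absurd hsp (sp_ne_nil rest)
        | cons h t => simp [consHead, hc]

theorem splitOn_eq_sp (l : List Char) : PySem.Chars.splitOn l ['.'] = sp l := by
  rw [PySem.Chars.splitOn, go_spec _ _ _ _ (by omega)]
  cases hsp : sp l with
  | nil => exact absurd hsp (sp_ne_nil l)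
  | cons h t => simp [consHead]

theorem sp_append (a b : List Char) : sp (a ++ '.' :: b) = sp a ++ sp b := by
  induction a with
  | nil => cases hb : sp b with
    | nil => exact absurd hb (sp_ne_nil b)
    | cons h t => simp [sp, hb]
  | cons c a ih =>
    simp only [List.cons_append, sp, ih]
    cases ha : sp a with
    | nil => exact absurd ha (sp_ne_nil a)
    | cons h t => by_cases hc : c = '.' <;> simp [hc]

theorem split_dot (s : String) :
    (PySem.Str.split? s ".").getD [] = (sp s.toList).map String.ofList := by
  have h := PySem.Str.split?_map s "."
  have hsep : (".").toList = ['.'] := rfl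
  rw [hsep, PySem.Chars.split?] at h
  simp only [List.isEmpty_cons, if_false, Bool.false_eq_true, splitOn_eq_sp] at h
  cases hx : PySem.Str.split? s "." with
  | none => rw [hx] at h; simp at h
  | some X =>
    rw [hx] at h
    simp only [Option.map_some, Option.some.injEq] at h
    have : X = (sp s.toList).map String.ofList := by
      rw [← h, List.map_map]
      have : String.ofList ∘ String.toList = id := by
        funext x; simp
      simp [this]
    simp [this]

/-- Both ports agree on hosts of the form `pre ++ "." ++ base` when the loop fires on `base`. -/
theorem branch_eq (host : String) (pre : List Char) (base : String)
    (hsplit : host.toList = pre ++ '.' :: base.toList)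
    (hlen2 : 2 ≤ (sp base.toList).length) :
    (some (((PySem.Str.split? (PySem.Str.slice host none (some (-(PySem.Str.len base + 1)))) ".").getD []).headD "") : Option String) =
      (if 2 < ((PySem.Str.split? host ".").getD []).length
        then some (((PySem.Str.split? host ".").getD []).headD "") else none) := by
  have hsub : (PySem.Str.slice host none (some (-(PySem.Str.len base + 1)))).toList = pre := by
    have hk : -(PySem.Str.len base + 1) = -((base.toList.length + 1 : Nat) : Int) := by
      rw [PySem.Str.len_eq]; push_cast; ring
    rw [PySem.Str.toList_slice, PySem.Chars.slice_eq_listSlice, hk,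
      PySem.List.slice_to_neg_natCast _ _ (by omega), hsplit]
    have : (pre ++ '.' :: base.toList).length - (base.toList.length + 1) = pre.length := by
      simp only [List.length_append, List.length_cons]
      omega
    rw [this]
    exact List.take_left' rfl
  rw [split_dot, split_dot, hsub, hsplit, sp_append]
  cases hp : sp pre with
  | nil => exact absurd hp (sp_ne_nil pre)
  | cons h t =>
    cases hb : sp base.toList with
    | nil => exact absurd hb (sp_ne_nil base.toList)
    | cons bh bt =>
      rw [hb] at hlen2
      have hgt : 2 < ((((h :: t) ++ bh :: bt)).map String.ofList).length := by
        simp at hlen2 ⊢; omega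
      rw [if_pos hgt]
      simp

-- ===== VERDICT (by name: the statement is the Claim_ definition above) =====
theorem uni_slug_from_host_py_spec : Claim_equal_uni_slug_from_host_py := by
  intro host _
  unfold Spec_uni_slug_from_host_py
  by_cases hb1 : host = "saas.sferaplatform.ru"
  · subst hb1; decide
  by_cases hb2 : host = "sferaplatform.ru"
  · subst hb2; decide
  have c1 : (host == "saas.sferaplatform.ru") = false := by simp [hb1]
  have c2 : (host == "sferaplatform.ru") = false := by simp [hb2]
  have hcont : LAYERED_BASE_DOMAINS.contains host = false := by
    simp [LAYERED_BASE_DOMAINS, hb1, hb2]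
  by_cases e1 : PySem.Str.endswith host ("." ++ "saas.sferaplatform.ru") = true
  · -- loop fires on the first base
    obtain ⟨pre, hpre⟩ : ∃ pre, host.toList = pre ++ '.' :: ("saas.sferaplatform.ru" : String).toList := by
      rw [PySem.Str.endswith_eq, PySem.Chars.endswith_iff] at e1
      obtain ⟨pre, hpre⟩ := e1
      exact ⟨pre, by rw [← hpre, String.toList_append]; rfl⟩
    rw [uni_slug_from_host_py, uni_slug_from_host_py_alt, hcont]
    simp only [LAYERED_BASE_DOMAINS, uniLoopA, c1, Bool.false_eq_true, if_false, e1, if_true]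
    exact branch_eq host pre "saas.sferaplatform.ru" hpre (by decide)
  by_cases e2 : PySem.Str.endswith host ("." ++ "sferaplatform.ru") = true
  · obtain ⟨pre, hpre⟩ : ∃ pre, host.toList = pre ++ '.' :: ("sferaplatform.ru" : String).toList := by
      rw [PySem.Str.endswith_eq, PySem.Chars.endswith_iff] at e2
      obtain ⟨pre, hpre⟩ := e2
      exact ⟨pre, by rw [← hpre, String.toList_append]; rfl⟩
    rw [uni_slug_from_host_py, uni_slug_from_host_py_alt, hcont]
    simp only [LAYERED_BASE_DOMAINS, uniLoopA, c1, c2, Bool.false_eq_true, if_false,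
      e1, e2, if_true]
    exact branch_eq host pre "sferaplatform.ru" hpre (by decide)
  · -- no base matches: both take the fallback
    rw [uni_slug_from_host_py, uni_slug_from_host_py_alt, hcont]
    simp only [LAYERED_BASE_DOMAINS, uniLoopA, c1, c2, Bool.false_eq_true, if_false,
      e1, e2]
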